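-- pv_equiv track=rewrite | github.com/Axelrod-Python/NN | features.py | cumulative_cooperations
-- ===== SOURCE A (Python) =====
-- def cumulative_cooperations(h):
--     """Computes the cumulative cooperations over the full history."""
--     coops = []
--     s = 0
--     for play in h:
--         if play == 'C':
--             s += 1
--         coops.append(s)
--     return coops
-- ===== SOURCE B (Python) =====
-- def cumulative_cooperations(h):
--     """Computes the cumulative cooperations over the full history."""
--     h = list(h)
--     return [h[:i + 1].count('C') for i in range(len(h))]
-- ===== Notes on version B (the rewrite author's own statement) =====
-- stated objective: alternative
-- what changed: Replaces the running-accumulator loop by a comprehension that re-counts 'C' in each prefix h[:i+1] independently.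
import Mathlib
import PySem

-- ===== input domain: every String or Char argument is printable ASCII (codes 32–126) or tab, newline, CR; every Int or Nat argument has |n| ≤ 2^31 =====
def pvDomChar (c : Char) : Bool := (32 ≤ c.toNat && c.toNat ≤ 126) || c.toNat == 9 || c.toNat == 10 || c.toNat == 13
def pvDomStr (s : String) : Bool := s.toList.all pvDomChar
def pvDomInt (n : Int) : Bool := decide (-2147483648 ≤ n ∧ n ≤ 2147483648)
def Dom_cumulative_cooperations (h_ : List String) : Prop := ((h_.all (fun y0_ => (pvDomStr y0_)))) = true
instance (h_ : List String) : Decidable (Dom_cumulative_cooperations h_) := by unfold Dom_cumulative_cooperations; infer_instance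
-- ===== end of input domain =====

-- B replaces A's running-accumulator loop by re-counting 'C' in each prefix h[:i+1]; alternative formulation, not faster.


-- ===== PORT A =====
-- for play in h: if play == 'C': s += 1; coops.append(s)
def cumulative_cooperations (h_ : List String) : List Int :=
  (h_.foldl
    (fun (st : List Int × Int) play =>
      let s := if play == "C" then st.2 + 1 else st.2
      (st.1 ++ [s], s))
    ([], 0)).1

-- ===== PORT B =====
-- [h[:i+1].count('C') for i in range(len(h))]
def cumulative_cooperations_alt (h_ : List String) : List Int :=
  (PySem.List.pyRange 0 (h_.length : Int) 1).map
    (fun i => ((PySem.List.count (PySem.List.slice h_ none (some (i + 1))) "C" : Nat) : Int))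

-- ===== PRECONDITION & SPEC =====
def Spec_cumulative_cooperations (h_ : List String) (out : List Int) : Prop := out = cumulative_cooperations_alt h_
instance (h_ : List String) (out : List Int) : Decidable (Spec_cumulative_cooperations h_ out) := by unfold Spec_cumulative_cooperations; infer_instance

-- ===== CLAIM (what is proved, stated in full; the proofs are below) =====
def Claim_equal_cumulative_cooperations : Prop := ∀ (h_ : List String), Dom_cumulative_cooperations h_ → Spec_cumulative_cooperations h_ (cumulative_cooperations h_)

-- ===== LEMMAS AND PROOFS =====

-- A's loop, generalized over the accumulated list and running sum.
lemma cumcoop_foldl (h : List String) : ∀ (acc : List Int) (s : Int),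
    (h.foldl
      (fun (st : List Int × Int) play =>
        let s := if play == "C" then st.2 + 1 else st.2
        (st.1 ++ [s], s))
      (acc, s)).1
    = acc ++ (List.range h.length).map (fun k => s + ((h.take (k + 1)).count "C" : Int)) := by
  induction h with
  | nil => intro acc s; simp
  | cons a t ih =>
    intro acc s
    simp only [List.foldl_cons, List.length_cons, ih]
    rw [List.range_succ_eq_map]
    simp only [List.map_cons, List.map_map, List.append_assoc]
    congr 1
    by_cases hC : a == "C"
    · simp [List.count_cons, List.take_succ_cons, hC]
      intro k _
      ring
    · simp [List.count_cons, List.take_succ_cons, hC]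

-- B rewritten over List.range.
lemma cumcoop_alt_eq (h : List String) :
    cumulative_cooperations_alt h
    = (List.range h.length).map (fun k => ((h.take (k + 1)).count "C" : Int)) := by
  unfold cumulative_cooperations_alt
  rw [PySem.List.pyRange_zero_natCast]
  rw [List.map_map]
  congr 1
  funext k
  have : ((k : Int) + 1) = ((k + 1 : Nat) : Int) := by push_cast; ring
  simp only [Function.comp, this, PySem.List.slice_to_natCast, PySem.List.count_eq]

-- ===== VERDICT (by name: the statement is the Claim_ definition above) =====
theorem cumulative_cooperations_spec : Claim_equal_cumulative_cooperations := by
  intro h _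
  unfold Spec_cumulative_cooperations cumulative_cooperations
  rw [cumcoop_foldl h [] 0, cumcoop_alt_eq]
  simp
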